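-- pv_equiv track=rewrite | github.com/PollVerge/TwitterStream | process_data.py | get_approval
-- ===== SOURCE A (Python) =====
-- def get_approval(column):
--     results = {
--         'approve': 0,
--         'neutral': 0,
--         'disapprove': 0,
--         'count': 0,
--     }
--
--     for row in column:
--         if row is not None:
--             if row > 0:
--                 results['approve'] += 1
--             elif row == 0:
--                 results['neutral'] += 1
--             else:
--                 results['disapprove'] += 1
--             results['count'] += 1
--     return results
-- ===== SOURCE B (Python) =====
-- def get_approval(column):
--     valid = [v for v in column if v is not None]
--     approve = sum(1 for v in valid if v > 0)
--     neutral = sum(1 for v in valid if v == 0)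
--     disapprove = sum(1 for v in valid if v < 0)
--     return {
--         'approve': approve,
--         'neutral': neutral,
--         'disapprove': disapprove,
--         'count': len(valid),
--     }
-- ===== Notes on version B (the rewrite author's own statement) =====
-- stated objective: alternative
-- what changed: Replaces the single interleaved tallying loop that increments a mutable dict per row with a filter of the None entries followed by three independent counting scans (and len for count), assembling the dict once at the end.
import Mathlib
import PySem

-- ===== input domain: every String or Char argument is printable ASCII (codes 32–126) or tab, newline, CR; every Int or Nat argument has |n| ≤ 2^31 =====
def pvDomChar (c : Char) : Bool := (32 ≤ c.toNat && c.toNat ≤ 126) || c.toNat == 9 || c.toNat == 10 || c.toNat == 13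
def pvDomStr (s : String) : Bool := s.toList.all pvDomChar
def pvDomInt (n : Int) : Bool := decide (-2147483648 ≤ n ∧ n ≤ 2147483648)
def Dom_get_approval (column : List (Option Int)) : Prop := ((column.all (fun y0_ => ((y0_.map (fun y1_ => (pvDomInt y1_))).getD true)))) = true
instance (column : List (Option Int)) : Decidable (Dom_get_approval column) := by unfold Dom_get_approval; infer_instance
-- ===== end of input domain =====

-- B replaces A's single interleaved tallying loop by a None-filter plus three independent
-- counting scans (alternative decomposition, same O(n) cost).

-- ===== PORT A =====
-- 'results[k] += 1' on the insertion-ordered dict (assoc list, unique literal keys)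
def pvBump : List (String × Int) → String → List (String × Int)
  | [], _ => []
  | (k', v) :: rest, k => if k' = k then (k', v + 1) :: rest else (k', v) :: pvBump rest k

def get_approval (column : List (Option Int)) : List (String × Int) :=
  column.foldl
    (fun results row =>
      match row with
      | none => results
      | some r =>
        let results :=
          if r > 0 then pvBump results "approve"
          else if r = 0 then pvBump results "neutral"
          else pvBump results "disapprove"
        pvBump results "count")
    [("approve", 0), ("neutral", 0), ("disapprove", 0), ("count", 0)]

-- ===== PORT B =====
def get_approval_alt (column : List (Option Int)) : List (String × Int) :=
  let valid := column.filterMap id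
  let approve : Int := ((valid.filter (fun v => decide (v > 0))).length : Int)
  let neutral : Int := ((valid.filter (fun v => decide (v = 0))).length : Int)
  let disapprove : Int := ((valid.filter (fun v => decide (v < 0))).length : Int)
  [("approve", approve), ("neutral", neutral), ("disapprove", disapprove),
   ("count", (valid.length : Int))]

-- ===== PRECONDITION & SPEC =====
def Spec_get_approval (column : List (Option Int)) (out : List (String × Int)) : Prop := out = get_approval_alt column
instance (column : List (Option Int)) (out : List (String × Int)) : Decidable (Spec_get_approval column out) := by unfold Spec_get_approval; infer_instance

-- ===== CLAIM (what is proved, stated in full; the proofs are below) =====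
def Claim_equal_get_approval : Prop := ∀ (column : List (Option Int)), Dom_get_approval column → Spec_get_approval column (get_approval column)

-- ===== LEMMAS AND PROOFS =====
lemma get_approval_loop (col : List (Option Int)) (a n d c : Int) :
    col.foldl
      (fun results row =>
        match row with
        | none => results
        | some r =>
          let results :=
            if r > 0 then pvBump results "approve"
            else if r = 0 then pvBump results "neutral"
            else pvBump results "disapprove"
          pvBump results "count")
      [("approve", a), ("neutral", n), ("disapprove", d), ("count", c)] =
    [("approve", a + (((col.filterMap id).filter (fun v => decide (v > 0))).length : Int)),
     ("neutral", n + (((col.filterMap id).filter (fun v => decide (v = 0))).length : Int)),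
     ("disapprove", d + (((col.filterMap id).filter (fun v => decide (v < 0))).length : Int)),
     ("count", c + ((col.filterMap id).length : Int))] := by
  induction col generalizing a n d c with
  | nil => simp
  | cons hd tl ih =>
    match hd with
    | none =>
      simp only [List.foldl_cons]
      exact ih a n d c
    | some r =>
      rcases lt_trichotomy r 0 with hr | hr | hr
      · have h1 : ¬ r > 0 := by omega
        have h2 : r ≠ 0 := by omega
        simp only [List.foldl_cons, h1, h2, if_false,
          pvBump, String.reduceEq, reduceIte]
        rw [ih a n (d + 1) (c + 1)]
        simp [h1, h2, hr]
        constructor <;> ring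
      · subst hr
        simp only [List.foldl_cons, pvBump, lt_irrefl,
          if_false, if_true, String.reduceEq]
        rw [ih a (n + 1) d (c + 1)]
        simp
        constructor <;> ring
      · simp only [List.foldl_cons, hr, if_pos, pvBump, String.reduceEq, reduceIte]
        rw [ih (a + 1) n d (c + 1)]
        simp [List.filter_cons, hr]
        rw [if_neg (show ¬ r = 0 by omega), if_neg (show ¬ r < 0 by omega)]
        simp
        omega

-- ===== VERDICT (by name: the statement is the Claim_ definition above) =====
theorem get_approval_spec : Claim_equal_get_approval := by
  intro column _
  unfold Spec_get_approval get_approval get_approval_alt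
  rw [get_approval_loop]
  simp
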